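-- pv_equiv track=rewrite | github.com/daahunii/AutoBuild4Byte | src/healing/llm_healer.py | _extract_relevant_logs
-- ===== SOURCE A (Python) =====
-- def _extract_relevant_logs(logs: str, max_lines=100) -> str:
--     """
--     Extracts relevant lines from build logs to feed to LLM.
--     Prioritizes 'Caused by', 'FAILURE:', 'Error:', and stack traces.
--     """
--     lines = logs.split('\n')
--     relevant_lines = []
--
--     # Keywords to look for
--     keywords = ["Caused by:", "FAILURE:", "Error:", "Exception", "Build failed", "What went wrong:"]
--
--     # Scan for interesting lines
--     hit_indices = [i for i, line in enumerate(lines) if any(k in line for k in keywords)]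
--
--     if not hit_indices:
--         # Fallback to tail if no keywords found
--         return "\n".join(lines[-100:])
--
--     # Collect context around hits
--     kept_indices = set()
--     for i in hit_indices:
--         start = max(0, i - 10) # 10 lines before
--         end = min(len(lines), i + 20) # 20 lines after
--         kept_indices.update(range(start, end))
--
--     sorted_indices = sorted(list(kept_indices))
--
--     # Reconstruct log
--     snippet = []
--     last_idx = -1
--     for idx in sorted_indices:
--         if last_idx != -1 and idx > last_idx + 1:
--             snippet.append("... (skipped) ...")
--         snippet.append(lines[idx])
--         last_idx = idx
--
--     return "\n".join(snippet)
-- ===== SOURCE B (Python) =====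
-- def _extract_relevant_logs(logs: str, max_lines=100) -> str:
--     """Interval-merge re-implementation: map each keyword hit to its context
--     window, merge overlapping/adjacent windows on the fly (hits come in
--     increasing order), and emit merged windows separated by a skip marker."""
--     lines = logs.split('\n')
--     keywords = ["Caused by:", "FAILURE:", "Error:", "Exception", "Build failed", "What went wrong:"]
--     hits = [i for i, line in enumerate(lines) if any(k in line for k in keywords)]
--     if not hits:
--         return "\n".join(lines[-100:])
--     n = len(lines)
--     cur_start = max(0, hits[0] - 10)
--     cur_end = min(n, hits[0] + 20)
--     out = []
--     for i in hits[1:]: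
--         s = max(0, i - 10)
--         e = min(n, i + 20)
--         if s <= cur_end:
--             cur_end = e  # hits are increasing, so e >= cur_end: window extends
--         else:
--             out.extend(lines[cur_start:cur_end])
--             out.append("... (skipped) ...")
--             cur_start, cur_end = s, e
--     out.extend(lines[cur_start:cur_end])
--     return "\n".join(out)
-- ===== Notes on version B (the rewrite author's own statement) =====
-- stated objective: alternative
-- what changed: Replaces the set-of-all-kept-indices plus sort plus gap-detecting reconstruction with on-the-fly merging of the per-hit context intervals (hits arrive in increasing order), emitting each merged window as a slice with a skip marker between windows.
import Mathlib
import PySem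

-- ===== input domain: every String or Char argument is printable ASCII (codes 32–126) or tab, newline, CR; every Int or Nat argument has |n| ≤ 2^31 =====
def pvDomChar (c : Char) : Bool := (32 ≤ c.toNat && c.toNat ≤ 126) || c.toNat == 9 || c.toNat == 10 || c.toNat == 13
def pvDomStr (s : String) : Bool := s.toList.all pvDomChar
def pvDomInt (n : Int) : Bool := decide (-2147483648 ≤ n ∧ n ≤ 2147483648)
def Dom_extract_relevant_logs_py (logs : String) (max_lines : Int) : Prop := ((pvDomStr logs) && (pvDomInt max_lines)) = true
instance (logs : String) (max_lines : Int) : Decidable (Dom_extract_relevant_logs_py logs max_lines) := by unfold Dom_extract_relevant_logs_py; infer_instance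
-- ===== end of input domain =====

-- B replaces A's kept-index set + sort + gap scan by on-the-fly merging of the per-hit
-- context intervals (one alternative pass; equal return value).

-- ===== PORT A =====
def extract_relevant_logs_py (logs : String) (max_lines : Int) : String :=
  let lines := (PySem.Str.split? logs "\n").getD []
  let keywords : List String :=
    ["Caused by:", "FAILURE:", "Error:", "Exception", "Build failed", "What went wrong:"]
  let hit_indices : List Int :=
    ((PySem.List.enumerate lines 0).filter
      (fun p => keywords.any (fun k => PySem.Str.isIn k p.2))).map (fun p => p.1)
  if hit_indices.isEmpty then
    PySem.Str.join "\n" (PySem.List.slice lines (some (-100)) none)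
  else
    let kept : PySem.Set Int :=
      hit_indices.foldl
        (fun s i =>
          PySem.Set.update s
            (PySem.List.pyRange (max 0 (i - 10)) (min (PySem.List.len lines) (i + 20)) 1))
        PySem.Set.empty
    let sorted_indices := PySem.List.sorted kept (fun x => x) false
    -- lines[idx]: every idx in the set is provably in range, so pyGetD with default "" is exact
    let snippet :=
      (sorted_indices.foldl
        (fun (acc : List String × Int) idx =>
          let snip :=
            if acc.2 ≠ -1 ∧ idx > acc.2 + 1 then acc.1 ++ ["... (skipped) ..."] else acc.1
          (snip ++ [PySem.List.pyGetD lines idx ""], idx))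
        ([], -1)).1
    PySem.Str.join "\n" snippet

-- ===== PORT B =====
def extract_relevant_logs_py_alt (logs : String) (max_lines : Int) : String :=
  let lines := (PySem.Str.split? logs "\n").getD []
  let keywords : List String :=
    ["Caused by:", "FAILURE:", "Error:", "Exception", "Build failed", "What went wrong:"]
  let hits : List Int :=
    ((PySem.List.enumerate lines 0).filter
      (fun p => keywords.any (fun k => PySem.Str.isIn k p.2))).map (fun p => p.1)
  match hits with
  | [] => PySem.Str.join "\n" (PySem.List.slice lines (some (-100)) none)
  | h :: rest =>
    let n := PySem.List.len lines
    let st :=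
      rest.foldl
        (fun (acc : List String × Int × Int) i =>
          let s := max 0 (i - 10)
          let e := min n (i + 20)
          if s ≤ acc.2.2 then (acc.1, acc.2.1, e)
          else
            (acc.1 ++ PySem.List.slice lines (some acc.2.1) (some acc.2.2) ++
              ["... (skipped) ..."], s, e))
        (([] : List String), max 0 (h - 10), min n (h + 20))
    PySem.Str.join "\n" (st.1 ++ PySem.List.slice lines (some st.2.1) (some st.2.2))

-- ===== PRECONDITION & SPEC =====
def Spec_extract_relevant_logs_py (logs : String) (max_lines : Int) (out : String) : Prop := out = extract_relevant_logs_py_alt logs max_lines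
instance (logs : String) (max_lines : Int) (out : String) : Decidable (Spec_extract_relevant_logs_py logs max_lines out) := by unfold Spec_extract_relevant_logs_py; infer_instance

-- ===== CLAIM (what is proved, stated in full; the proofs are below) =====
def Claim_equal_extract_relevant_logs_py : Prop := ∀ (logs : String) (max_lines : Int), Dom_extract_relevant_logs_py logs max_lines → Spec_extract_relevant_logs_py logs max_lines (extract_relevant_logs_py logs max_lines)

-- ===== LEMMAS AND PROOFS =====

def pvMergeIvs : Int → Int → List (Int × Int) → List (Int × Int)
  | cs, ce, [] => [(cs, ce)]
  | cs, ce, (s, e) :: rest =>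
    if s ≤ ce then pvMergeIvs cs e rest else (cs, ce) :: pvMergeIvs s e rest
def pvInv (n cs ce : Int) (l : List (Int × Int)) : Prop :=
  0 ≤ cs ∧ cs < ce ∧ ce ≤ n ∧
  (∀ p ∈ l, cs ≤ p.1 ∧ ce ≤ p.2 ∧ p.1 < p.2 ∧ p.2 ≤ n) ∧
  l.Pairwise (fun p q => p.1 ≤ q.1 ∧ p.2 ≤ q.2)

lemma pvMergeIvs_head (l : List (Int × Int)) : ∀ cs ce : Int,
    ∃ E t, pvMergeIvs cs ce l = (cs, E) :: t := by
  induction l with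
  | nil => intro cs ce; exact ⟨ce, [], rfl⟩
  | cons p rest ih =>
    intro cs ce
    obtain ⟨s, e⟩ := p
    by_cases h : s ≤ ce
    · obtain ⟨E, t, ht⟩ := ih cs e
      exact ⟨E, t, by simp only [pvMergeIvs, if_pos h, ht]⟩
    · exact ⟨ce, pvMergeIvs s e rest, by simp only [pvMergeIvs, if_neg h]⟩

lemma pvMerge_facts {n : Int} : ∀ (l : List (Int × Int)) (cs ce : Int), pvInv n cs ce l →
    (∀ p ∈ pvMergeIvs cs ce l, 0 ≤ p.1 ∧ p.1 < p.2 ∧ p.2 ≤ n ∧ cs ≤ p.1) ∧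
    (pvMergeIvs cs ce l).Pairwise (fun p q => p.2 < q.1) := by
  intro l
  induction l with
  | nil =>
    intro cs ce ⟨h0, h1, h2, _, _⟩
    refine ⟨?_, by simp [pvMergeIvs]⟩
    intro p hp; simp [pvMergeIvs] at hp; subst hp; exact ⟨h0, h1, h2, le_refl _⟩
  | cons p rest ih =>
    intro cs ce hinv
    obtain ⟨s, e⟩ := p
    obtain ⟨h0, h1, h2, hall, hpw⟩ := hinv
    obtain ⟨hcs, hce, hse, hen⟩ := hall (s, e) (by simp)
    rw [List.pairwise_cons] at hpw
    by_cases h : s ≤ ce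
    · rw [show pvMergeIvs cs ce ((s, e) :: rest) = pvMergeIvs cs e rest from by
        simp only [pvMergeIvs, if_pos h]]
      exact ih cs e ⟨h0, by omega, hen, fun q hq =>
        ⟨(hall q (by simp [hq])).1, (hpw.1 q hq).2, (hall q (by simp [hq])).2.2⟩, hpw.2⟩
    · rw [show pvMergeIvs cs ce ((s, e) :: rest) = (cs, ce) :: pvMergeIvs s e rest from by
        simp only [pvMergeIvs, if_neg h]]
      have hinv' : pvInv n s e rest := ⟨by omega, hse, hen, fun q hq =>
        ⟨(hpw.1 q hq).1, (hpw.1 q hq).2, (hall q (by simp [hq])).2.2⟩, hpw.2⟩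
      obtain ⟨ihf, ihp⟩ := ih s e hinv'
      constructor
      · intro q hq
        rcases List.mem_cons.1 hq with hq | hq
        · subst hq; exact ⟨h0, h1, h2, le_refl _⟩
        · obtain ⟨a, b, c, d⟩ := ihf q hq; exact ⟨a, b, c, by omega⟩
      · rw [List.pairwise_cons]
        exact ⟨fun q hq => by have := (ihf q hq).2.2.2; simp; omega, ihp⟩

lemma pvMerge_mem {n : Int} : ∀ (l : List (Int × Int)) (cs ce x : Int), pvInv n cs ce l →
    (x ∈ (pvMergeIvs cs ce l).flatMap (fun p => PySem.List.pyRange p.1 p.2 1) ↔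
      (cs ≤ x ∧ x < ce) ∨ ∃ p ∈ l, p.1 ≤ x ∧ x < p.2) := by
  intro l
  induction l with
  | nil =>
    intro cs ce x _
    simp [pvMergeIvs, PySem.List.mem_pyRange_one]
  | cons p rest ih =>
    intro cs ce x hinv
    obtain ⟨s, e⟩ := p
    obtain ⟨h0, h1, h2, hall, hpw⟩ := hinv
    obtain ⟨hcs, hce, hse, hen⟩ := hall (s, e) (by simp)
    rw [List.pairwise_cons] at hpw
    by_cases h : s ≤ ce
    · rw [show pvMergeIvs cs ce ((s, e) :: rest) = pvMergeIvs cs e rest from by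
        simp only [pvMergeIvs, if_pos h]]
      rw [ih cs e x ⟨h0, by omega, hen, fun q hq =>
        ⟨(hall q (by simp [hq])).1, (hpw.1 q hq).2, (hall q (by simp [hq])).2.2⟩, hpw.2⟩]
      constructor
      · rintro (hx | hx)
        · by_cases hx' : x < ce
          · exact Or.inl ⟨hx.1, hx'⟩
          · exact Or.inr ⟨(s, e), by simp, by omega, hx.2⟩
        · exact Or.inr (by rcases hx with ⟨q, hq, hqx⟩; exact ⟨q, by simp [hq], hqx⟩)
      · rintro (hx | ⟨q, hq, hqx⟩)
        · exact Or.inl ⟨hx.1, by omega⟩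
        · rcases List.mem_cons.1 hq with hq | hq
          · subst hq; exact Or.inl ⟨by simp at hqx; omega, by simp at hqx ⊢; omega⟩
          · exact Or.inr ⟨q, hq, hqx⟩
    · rw [show pvMergeIvs cs ce ((s, e) :: rest) = (cs, ce) :: pvMergeIvs s e rest from by
        simp only [pvMergeIvs, if_neg h]]
      have hinv' : pvInv n s e rest := ⟨by omega, hse, hen, fun q hq =>
        ⟨(hpw.1 q hq).1, (hpw.1 q hq).2, (hall q (by simp [hq])).2.2⟩, hpw.2⟩
      rw [List.flatMap_cons, List.mem_append, ih s e x hinv', PySem.List.mem_pyRange_one]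
      constructor
      · rintro (hx | hx | ⟨q, hq, hqx⟩)
        · exact Or.inl hx
        · exact Or.inr ⟨(s, e), by simp, hx⟩
        · exact Or.inr ⟨q, by simp [hq], hqx⟩
      · rintro (hx | ⟨q, hq, hqx⟩)
        · exact Or.inl hx
        · rcases List.mem_cons.1 hq with hq | hq
          · subst hq; exact Or.inr (Or.inl hqx)
          · exact Or.inr (Or.inr ⟨q, hq, hqx⟩)

lemma pvFlat_pairwise (c : List (Int × Int))
    (hp : c.Pairwise (fun p q => p.2 < q.1)) :
    (c.flatMap (fun p => PySem.List.pyRange p.1 p.2 1)).Pairwise (· < ·) := by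
  rw [List.flatMap, List.pairwise_flatten]
  refine ⟨?_, ?_⟩
  · intro l hl
    rcases List.mem_map.1 hl with ⟨p, _, rfl⟩
    exact PySem.List.pairwise_lt_pyRange_one p.1 p.2
  · rw [List.pairwise_map]
    refine hp.imp_of_mem ?_
    intro p q hpm hqm hlt x hx y hy
    rw [PySem.List.mem_pyRange_one] at hx hy
    omega

lemma pvKept_mem (n : Int) : ∀ (l : List Int) (s0 : List Int) (x : Int),
    (x ∈ l.foldl
        (fun s i => PySem.Set.update s (PySem.List.pyRange (max 0 (i - 10)) (min n (i + 20)) 1))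
        s0) ↔
      x ∈ s0 ∨ ∃ i ∈ l, max 0 (i - 10) ≤ x ∧ x < min n (i + 20) := by
  intro l
  induction l with
  | nil => simp
  | cons i rest ih =>
    intro s0 x
    rw [List.foldl_cons, ih]
    rw [PySem.Set.mem_update]
    simp only [PySem.List.mem_pyRange_one, List.mem_cons]
    constructor
    · rintro ((h | h) | ⟨j, hj, hjx⟩)
      · exact Or.inl h
      · exact Or.inr ⟨i, Or.inl rfl, h⟩
      · exact Or.inr ⟨j, Or.inr hj, hjx⟩
    · rintro (h | ⟨j, (rfl | hj), hjx⟩)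
      · exact Or.inl (Or.inl h)
      · exact Or.inl (Or.inr hjx)
      · exact Or.inr ⟨j, hj, hjx⟩

lemma pvKept_nodup (n : Int) : ∀ (l : List Int) (s0 : List Int), s0.Nodup →
    (l.foldl
        (fun s i => PySem.Set.update s (PySem.List.pyRange (max 0 (i - 10)) (min n (i + 20)) 1))
        s0).Nodup := by
  intro l
  induction l with
  | nil => intro s0 h; exact h
  | cons i rest ih =>
    intro s0 h
    exact ih _ (PySem.Set.nodup_update _ _ h)

lemma pvHits_pairwise (lines : List String) (q : Int × String → Bool) :
    ((((PySem.List.enumerate lines 0).filter q).map (fun p => p.1)).Pairwise (· < ·)) := by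
  rw [List.pairwise_map]
  have h1 : (PySem.List.enumerate lines 0).Pairwise (fun p q => p.1 < q.1) := by
    have h2 := PySem.List.pairwise_lt_pyRange_one 0 (0 + (lines.length : Int))
    rw [← PySem.List.map_fst_enumerate lines 0, List.pairwise_map] at h2
    exact h2
  exact h1.filter q

lemma pvHits_mem (lines : List String) (q : Int × String → Bool) (i : Int)
    (h : i ∈ ((PySem.List.enumerate lines 0).filter q).map (fun p => p.1)) :
    0 ≤ i ∧ i < (lines.length : Int) := by
  have hsub : (((PySem.List.enumerate lines 0).filter q).map (fun p => p.1)).Sublist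
      ((PySem.List.enumerate lines 0).map (fun p => p.1)) :=
    (List.filter_sublist).map _
  have := hsub.subset h
  rw [PySem.List.map_fst_enumerate lines 0] at this
  have := PySem.List.mem_pyRange_one.1 this
  omega

def pvIvs (n : Int) (l : List Int) : List (Int × Int) :=
  l.map (fun i => (max 0 (i - 10), min n (i + 20)))

lemma pvInv_ivs (n h : Int) (rest : List Int) (hh : 0 ≤ h ∧ h < n)
    (hb : ∀ i ∈ rest, 0 ≤ i ∧ i < n) (hp : rest.Pairwise (· < ·)) (hhr : ∀ i ∈ rest, h < i) :
    pvInv n (max 0 (h - 10)) (min n (h + 20)) (pvIvs n rest) := by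
  unfold pvIvs
  refine ⟨by omega, by omega, by omega, ?_, ?_⟩
  · intro p hp'
    rcases List.mem_map.1 hp' with ⟨i, hi, rfl⟩
    have := hb i hi
    have := hhr i hi
    refine ⟨by simp; omega, by simp; omega, by simp; omega, by simp⟩
  · rw [List.pairwise_map]
    exact hp.imp (fun {a b} hab => ⟨by simp; omega, by simp; omega⟩)

def pvMarker : String := "... (skipped) ..."
def pvStepA (lines : List String) (acc : List String × Int) (idx : Int) : List String × Int :=
  let snip := if acc.2 ≠ -1 ∧ idx > acc.2 + 1 then acc.1 ++ ["... (skipped) ..."] else acc.1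
  (snip ++ [PySem.List.pyGetD lines idx ""], idx)
def pvLastE : List (Int × Int) → Int → Int
  | [], d => d
  | p :: t, _ => pvLastE t p.2

lemma pvMapRange_eq_slice (lines : List String) (s e : Int)
    (h0 : 0 ≤ s) (hse : s ≤ e) (hen : e ≤ (lines.length : Int)) :
    (PySem.List.pyRange s e 1).map (fun i => PySem.List.pyGetD lines i "") =
      PySem.List.slice lines (some s) (some e) := by
  rw [PySem.List.slice_of_nonneg lines h0 (by omega) (by omega) hen]
  apply List.ext_getElem
  · simp [PySem.List.length_pyRange_one]
    omega
  · intro k hk1 hk2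
    rw [List.getElem_map, PySem.List.getElem_pyRange_one]
    rw [List.length_map, PySem.List.length_pyRange_one] at hk1
    have hin : s + (k : Int) < (lines.length : Int) := by omega
    rw [PySem.List.pyGetD_eq_getElem lines "" (by omega) (by simpa using hin)]
    rw [List.getElem_take, List.getElem_drop]
    congr 1
    omega

lemma pvContig (lines : List String) : ∀ (k : Nat) (a e : Int) (acc : List String),
    (e - a).toNat = k → a ≤ e →
    (PySem.List.pyRange a e 1).foldl (pvStepA lines) (acc, a - 1) =
      (acc ++ (PySem.List.pyRange a e 1).map (fun i => PySem.List.pyGetD lines i ""), e - 1) := by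
  intro k
  induction k with
  | zero =>
    intro a e acc hk hae
    have : e = a := by omega
    subst this
    rw [PySem.List.pyRange_one_eq_nil (by omega)]
    simp
  | succ m ih =>
    intro a e acc hk hae
    have hlt : a < e := by omega
    rw [PySem.List.pyRange_one_cons hlt]
    rw [List.foldl_cons, List.map_cons]
    have hstep : pvStepA lines (acc, a - 1) a = (acc ++ [PySem.List.pyGetD lines a ""], a) := by
      simp only [pvStepA]
      rw [if_neg (by omega)]
    rw [hstep]
    have := ih (a + 1) e (acc ++ [PySem.List.pyGetD lines a ""]) (by omega) (by omega)
    norm_num at this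
    rw [this]

def pvChunk (lines : List String) (p : Int × Int) : List String :=
  PySem.List.slice lines (some p.1) (some p.2)
def pvRender (lines : List String) : List (Int × Int) → List String
  | [] => []
  | p :: t => pvChunk lines p ++ t.flatMap (fun q => pvMarker :: pvChunk lines q)

lemma pvSnipAux (lines : List String) : ∀ (c : List (Int × Int)) (acc : List String) (e0 : Int),
    0 < e0 → (∀ p ∈ c, e0 < p.1 ∧ p.1 < p.2) → c.Pairwise (fun p q => p.2 < q.1) →
    (c.flatMap (fun p => PySem.List.pyRange p.1 p.2 1)).foldl (pvStepA lines) (acc, e0 - 1) =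
      (acc ++ c.flatMap
          (fun q => pvMarker :: (PySem.List.pyRange q.1 q.2 1).map (fun i => PySem.List.pyGetD lines i "")),
        pvLastE c e0 - 1) := by
  intro c
  induction c with
  | nil => intros; simp [pvLastE]
  | cons p t ih =>
    intro acc e0 he0 hc hp
    obtain ⟨s, e⟩ := p
    obtain ⟨hs1, hs2⟩ := hc (s, e) (by simp)
    simp only at hs1 hs2
    rw [List.pairwise_cons] at hp
    rw [List.flatMap_cons, List.foldl_append]
    rw [PySem.List.pyRange_one_cons hs2, List.foldl_cons]
    have hstep : pvStepA lines (acc, e0 - 1) s =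
        (acc ++ ["... (skipped) ...", PySem.List.pyGetD lines s ""], s) := by
      simp only [pvStepA]
      rw [if_pos (by constructor <;> omega)]
      simp
    rw [hstep]
    have hc2 := pvContig lines ((e - (s + 1)).toNat) (s + 1) e
      (acc ++ ["... (skipped) ...", PySem.List.pyGetD lines s ""]) rfl (by omega)
    norm_num at hc2
    rw [hc2]
    rw [ih _ _ (by omega) (fun q hq => ⟨hp.1 q hq, (hc q (by simp [hq])).2⟩) hp.2]
    rw [show pvLastE ((s, e) :: t) e0 = pvLastE t e from rfl]
    rw [List.flatMap_cons]
    rw [show ((PySem.List.pyRange s e 1).map (fun i => PySem.List.pyGetD lines i "")) =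
      PySem.List.pyGetD lines s "" ::
        (PySem.List.pyRange (s + 1) e 1).map (fun i => PySem.List.pyGetD lines i "") from by
      rw [PySem.List.pyRange_one_cons hs2, List.map_cons]]
    simp [pvMarker, List.append_assoc]

lemma pvAfold (lines : List String) (c : List (Int × Int))
    (hf : ∀ p ∈ c, 0 ≤ p.1 ∧ p.1 < p.2 ∧ p.2 ≤ (lines.length : Int))
    (hp : c.Pairwise (fun p q => p.2 < q.1)) :
    ((c.flatMap (fun p => PySem.List.pyRange p.1 p.2 1)).foldl (pvStepA lines) ([], -1)).1 =
      pvRender lines c := by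
  cases c with
  | nil => simp [pvRender]
  | cons p t =>
    obtain ⟨s, e⟩ := p
    obtain ⟨hs0, hs2, hsn⟩ := hf (s, e) (by simp)
    simp only at hs0 hs2 hsn
    rw [List.pairwise_cons] at hp
    rw [List.flatMap_cons, List.foldl_append]
    rw [PySem.List.pyRange_one_cons hs2, List.foldl_cons]
    have hstep : pvStepA lines (([] : List String), (-1 : Int)) s =
        ([PySem.List.pyGetD lines s ""], s) := by
      simp only [pvStepA]
      rw [if_neg (by simp)]
      simp
    rw [hstep]
    have hc2 := pvContig lines ((e - (s + 1)).toNat) (s + 1) e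
      [PySem.List.pyGetD lines s ""] rfl (by omega)
    norm_num at hc2
    rw [hc2]
    rw [pvSnipAux lines t _ _ (by omega)
      (fun q hq => ⟨hp.1 q hq, (hf q (by simp [hq])).2.1⟩) hp.2]
    rw [pvRender]
    rw [show pvChunk lines (s, e) =
        (PySem.List.pyRange s e 1).map (fun i => PySem.List.pyGetD lines i "") from
      (pvMapRange_eq_slice lines s e hs0 (by omega) hsn).symm]
    have htail : t.flatMap (fun q => pvMarker :: pvChunk lines q) =
        t.flatMap (fun q => pvMarker ::
          (PySem.List.pyRange q.1 q.2 1).map (fun i => PySem.List.pyGetD lines i "")) := by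
      apply List.flatMap_congr
      intro q hq
      obtain ⟨hq0, hq2, hqn⟩ := hf q (by simp [hq])
      rw [show pvChunk lines q =
          (PySem.List.pyRange q.1 q.2 1).map (fun i => PySem.List.pyGetD lines i "") from
        (pvMapRange_eq_slice lines q.1 q.2 hq0 (by omega) hqn).symm]
    rw [htail]
    rw [show ((PySem.List.pyRange s e 1).map (fun i => PySem.List.pyGetD lines i "")) =
      PySem.List.pyGetD lines s "" ::
        (PySem.List.pyRange (s + 1) e 1).map (fun i => PySem.List.pyGetD lines i "") from by
      rw [PySem.List.pyRange_one_cons hs2, List.map_cons]]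

def pvStepB (lines : List String) (acc : List String × Int × Int) (i : Int) : List String × Int × Int :=
  let s := max 0 (i - 10)
  let e := min (PySem.List.len lines) (i + 20)
  if s ≤ acc.2.2 then (acc.1, acc.2.1, e)
  else
    (acc.1 ++ PySem.List.slice lines (some acc.2.1) (some acc.2.2) ++ ["... (skipped) ..."], s, e)

lemma pvBfold (lines : List String) : ∀ (l : List Int) (out : List String) (cs ce : Int),
    (l.foldl (pvStepB lines) (out, cs, ce)).1 ++
        PySem.List.slice lines (some (l.foldl (pvStepB lines) (out, cs, ce)).2.1)
          (some (l.foldl (pvStepB lines) (out, cs, ce)).2.2) =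
      out ++ pvRender lines (pvMergeIvs cs ce (pvIvs (PySem.List.len lines) l)) := by
  intro l
  induction l with
  | nil =>
    intro out cs ce
    simp [pvIvs, pvMergeIvs, pvRender, pvChunk]
  | cons i t ih =>
    intro out cs ce
    rw [List.foldl_cons]
    by_cases h : max 0 (i - 10) ≤ ce
    · rw [show pvStepB lines (out, cs, ce) i = (out, cs, min (PySem.List.len lines) (i + 20)) from by
        simp only [pvStepB]; rw [if_pos h]]
      rw [ih out cs (min (PySem.List.len lines) (i + 20))]
      rw [show pvIvs (PySem.List.len lines) (i :: t) =
        (max 0 (i - 10), min (PySem.List.len lines) (i + 20)) :: pvIvs (PySem.List.len lines) t from rfl]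
      rw [show pvMergeIvs cs ce ((max 0 (i - 10), min (PySem.List.len lines) (i + 20)) ::
          pvIvs (PySem.List.len lines) t) =
        pvMergeIvs cs (min (PySem.List.len lines) (i + 20)) (pvIvs (PySem.List.len lines) t) from by
        simp only [pvMergeIvs]; rw [if_pos h]]
    · rw [show pvStepB lines (out, cs, ce) i =
        (out ++ PySem.List.slice lines (some cs) (some ce) ++ ["... (skipped) ..."],
          max 0 (i - 10), min (PySem.List.len lines) (i + 20)) from by
        simp only [pvStepB]; rw [if_neg h]]
      rw [ih _ _ _]
      rw [show pvIvs (PySem.List.len lines) (i :: t) =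
        (max 0 (i - 10), min (PySem.List.len lines) (i + 20)) :: pvIvs (PySem.List.len lines) t from rfl]
      rw [show pvMergeIvs cs ce ((max 0 (i - 10), min (PySem.List.len lines) (i + 20)) ::
          pvIvs (PySem.List.len lines) t) =
        (cs, ce) :: pvMergeIvs (max 0 (i - 10)) (min (PySem.List.len lines) (i + 20))
          (pvIvs (PySem.List.len lines) t) from by
        simp only [pvMergeIvs]; rw [if_neg h]]
      obtain ⟨E, t', ht'⟩ := pvMergeIvs_head (pvIvs (PySem.List.len lines) t)
        (max 0 (i - 10)) (min (PySem.List.len lines) (i + 20))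
      rw [ht']
      simp [pvRender, pvMarker, pvChunk, List.append_assoc]

-- ===== VERDICT (by name: the statement is the Claim_ definition above) =====
theorem extract_relevant_logs_py_spec : Claim_equal_extract_relevant_logs_py := by
  intro logs max_lines _
  show extract_relevant_logs_py logs max_lines = extract_relevant_logs_py_alt logs max_lines
  simp only [extract_relevant_logs_py, extract_relevant_logs_py_alt]
  set lines := (PySem.Str.split? logs "\n").getD [] with hlines
  set hits := ((PySem.List.enumerate lines 0).filter
      (fun p => ((["Caused by:", "FAILURE:", "Error:", "Exception", "Build failed",
        "What went wrong:"] : List String)).any (fun k => PySem.Str.isIn k p.2))).map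
      (fun p => p.1) with hhits
  cases hh : hits with
  | nil => rfl
  | cons h rest =>
    rw [hh] at hhits
    simp only [PySem.List.len_eq]
    have hpw : (h :: rest).Pairwise (· < ·) := by
      rw [hhits]; exact pvHits_pairwise lines _
    have hbd : ∀ i ∈ h :: rest, 0 ≤ i ∧ i < (lines.length : Int) := by
      intro i hi; rw [hhits] at hi; exact pvHits_mem lines _ i hi
    rw [List.pairwise_cons] at hpw
    have hinv := pvInv_ivs (lines.length : Int) h rest (hbd h (by simp))
      (fun i hi => hbd i (by simp [hi])) hpw.2 hpw.1
    set n : Int := (lines.length : Int) with hn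
    set cs0 : Int := max 0 (h - 10) with hcs0
    set ce0 : Int := min n (h + 20) with hce0
    set chunks : List (Int × Int) := pvMergeIvs cs0 ce0 (pvIvs n rest) with hchunks
    obtain ⟨hcf, hcp⟩ := pvMerge_facts (n := n) (pvIvs n rest) cs0 ce0 hinv
    have hf : ∀ p ∈ chunks, 0 ≤ p.1 ∧ p.1 < p.2 ∧ p.2 ≤ n :=
      fun p hp => ⟨(hcf p hp).1, (hcf p hp).2.1, (hcf p hp).2.2.1⟩
    have hflatpw : (chunks.flatMap (fun p => PySem.List.pyRange p.1 p.2 1)).Pairwise (· < ·) :=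
      pvFlat_pairwise chunks hcp
    have hndflat : (chunks.flatMap (fun p => PySem.List.pyRange p.1 p.2 1)).Nodup :=
      hflatpw.imp (fun hlt => ne_of_lt hlt)
    have hndkept : ((h :: rest).foldl
        (fun s i => PySem.Set.update s (PySem.List.pyRange (max 0 (i - 10)) (min n (i + 20)) 1))
        PySem.Set.empty).Nodup := pvKept_nodup n (h :: rest) _ (by simp [PySem.Set.empty])
    have hmem : ∀ x, x ∈ chunks.flatMap (fun p => PySem.List.pyRange p.1 p.2 1) ↔
        x ∈ (h :: rest).foldl
          (fun s i => PySem.Set.update s (PySem.List.pyRange (max 0 (i - 10)) (min n (i + 20)) 1))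
          PySem.Set.empty := by
      intro x
      rw [pvKept_mem n (h :: rest) _ x, hchunks, pvMerge_mem (n := n) (pvIvs n rest) cs0 ce0 x hinv]
      simp only [PySem.Set.empty, List.not_mem_nil, false_or, List.mem_cons, pvIvs, List.mem_map]
      constructor
      · rintro (hx | ⟨p, ⟨i, hi, rfl⟩, hpx⟩)
        · exact ⟨h, Or.inl rfl, by omega⟩
        · exact ⟨i, Or.inr hi, by simp at hpx; omega⟩
      · rintro ⟨i, (rfl | hi), hix⟩
        · exact Or.inl (by omega)
        · exact Or.inr ⟨(max 0 (i - 10), min n (i + 20)), ⟨i, hi, rfl⟩, by simp; omega⟩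
    have hperm : (chunks.flatMap (fun p => PySem.List.pyRange p.1 p.2 1)).Perm
        ((h :: rest).foldl
          (fun s i => PySem.Set.update s (PySem.List.pyRange (max 0 (i - 10)) (min n (i + 20)) 1))
          PySem.Set.empty) :=
      (List.perm_ext_iff_of_nodup hndflat hndkept).2 hmem
    have hsorted : PySem.List.sorted
        ((h :: rest).foldl
          (fun s i => PySem.Set.update s (PySem.List.pyRange (max 0 (i - 10)) (min n (i + 20)) 1))
          PySem.Set.empty) (fun x => x) false =
        chunks.flatMap (fun p => PySem.List.pyRange p.1 p.2 1) :=
      PySem.List.sorted_eq_of_perm_of_pairwise_lt _ _ (fun x => x) hperm hflatpw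
    rw [if_neg (by simp)]
    rw [hsorted]
    rw [show (fun (acc : List String × Int) idx =>
        ((if acc.2 ≠ -1 ∧ idx > acc.2 + 1 then acc.1 ++ ["... (skipped) ..."] else acc.1) ++
          [PySem.List.pyGetD lines idx ""], idx)) = pvStepA lines from rfl]
    rw [pvAfold lines chunks hf hcp]
    have hB := pvBfold lines rest [] cs0 ce0
    simp only [PySem.List.len_eq] at hB
    rw [show (fun (acc : List String × Int × Int) i =>
        if max 0 (i - 10) ≤ acc.2.2 then (acc.1, acc.2.1, min n (i + 20))
        else (acc.1 ++ PySem.List.slice lines (some acc.2.1) (some acc.2.2) ++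
          ["... (skipped) ..."], max 0 (i - 10), min n (i + 20))) = pvStepB lines from by
      funext acc i; simp only [pvStepB, PySem.List.len_eq, hn]]
    rw [hB]
    rw [← hn]
    rfl
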